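-- pv_equiv track=rewrite | github.com/titidutarn/hackerRank | Battleship_1_player.py | dfs_h
-- ===== SOURCE A (Python) =====
-- def dfs_h(grid, start):
--     visited, stack = set(), [start]
--     while stack:
--         vertex = stack.pop()
--         if vertex not in visited:
--             visited.add(vertex)
--             try :
--                 if grid[vertex[0]+1][vertex[1]]=='-' and vertex[0]+1<10:
--                     stack.extend([(vertex[0]+1,vertex[1])])
--             except:
--                 pass
--             try :
--                 if grid[vertex[0]-1][vertex[1]]=='-' and vertex[0]-1>=0:
--                     stack.extend([(vertex[0]-1,vertex[1])])
--             except: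
--                 pass
--     return visited
-- ===== SOURCE B (Python) =====
-- def dfs_h(grid, start):
--     # The reachable cells form one vertical run: climb upward from start while
--     # the '-'/bounds guards allow, then slide downward; no stack or visited-test needed.
--     r0, c = start
--
--     def ok(r):
--         try:
--             return grid[r][c] == '-'
--         except:
--             return False
--
--     out = [start]
--     r = r0 - 1
--     while r >= 0 and ok(r):
--         out.append((r, c))
--         r -= 1
--     r = r0 + 1
--     while r < 10 and ok(r):
--         out.append((r, c))
--         r += 1
--     return set(out)
-- ===== Notes on version B (the rewrite author's own statement) =====
-- stated objective: simpler
-- what changed: Replaces the stack-and-visited-set DFS by two plain directional while-loops: the cells reachable by the grid's vertical moves always form one contiguous run, so B just climbs upward from start while 'r>=0 and cell=='-'' and then slides downward while 'r<10 and cell=='-'', with no stack, no membership tests and no duplicate pushes.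
import Mathlib
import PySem

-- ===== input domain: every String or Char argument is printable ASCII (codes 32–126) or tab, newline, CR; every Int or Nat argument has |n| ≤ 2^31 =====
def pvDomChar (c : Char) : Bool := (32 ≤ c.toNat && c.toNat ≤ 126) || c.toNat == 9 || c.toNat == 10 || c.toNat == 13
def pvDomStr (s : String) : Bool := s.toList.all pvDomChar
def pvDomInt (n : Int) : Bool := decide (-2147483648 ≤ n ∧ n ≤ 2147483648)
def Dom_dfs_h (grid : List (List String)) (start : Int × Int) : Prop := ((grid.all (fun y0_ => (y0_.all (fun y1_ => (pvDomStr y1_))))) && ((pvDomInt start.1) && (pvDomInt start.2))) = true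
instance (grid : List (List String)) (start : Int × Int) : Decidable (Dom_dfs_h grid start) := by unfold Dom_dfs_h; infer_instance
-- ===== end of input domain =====

-- B replaces A's stack/visited DFS by two plain directional scans of the single
-- vertical run that is reachable (objective: simpler; return value only — neither mutates its arguments).

-- ===== PORT A =====

-- grid[r][c] under try/except: some cell if both indices are in (Python, possibly negative) range, none = IndexError
def dfs_hCell (grid : List (List String)) (c r : Int) : Option String :=
  (PySem.List.pyGet? grid r).bind fun row => PySem.List.pyGet? row c

-- all row indices a push can carry (their cell lookup succeeded): -len ≤ r < len
def dfs_hRows (grid : List (List String)) : Finset Int :=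
  (Finset.range (2 * grid.length)).image (fun i : Nat => (i : Int) - (grid.length : Int))

-- termination measure for A's while loop: unvisited candidate cells (twice) plus pending stack entries
def dfs_hMeasure (grid : List (List String)) (visited stack : List (Int × Int)) : Nat :=
  2 * ((((dfs_hRows grid) ×ˢ (stack.toFinset.image Prod.snd)) ∪ stack.toFinset) \ visited.toFinset).card
    + stack.length

lemma dfs_hMeasure_skip (grid : List (List String)) (visited : List (Int × Int))
    (v : Int × Int) (rest : List (Int × Int)) :
    dfs_hMeasure grid visited rest < dfs_hMeasure grid visited (v :: rest) := by
  unfold dfs_hMeasure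
  have hsub : (((dfs_hRows grid) ×ˢ (rest.toFinset.image Prod.snd)) ∪ rest.toFinset) \ visited.toFinset
      ⊆ (((dfs_hRows grid) ×ˢ ((v :: rest).toFinset.image Prod.snd)) ∪ (v :: rest).toFinset) \ visited.toFinset := by
    intro x hx
    simp only [Finset.mem_sdiff, Finset.mem_union, Finset.mem_product, Finset.mem_image,
      List.mem_toFinset, List.mem_cons] at hx ⊢
    obtain ⟨h1, h2⟩ := hx
    refine ⟨?_, h2⟩
    rcases h1 with ⟨hr, a, ha, hac⟩ | h
    · exact Or.inl ⟨hr, a, Or.inr ha, hac⟩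
    · exact Or.inr (Or.inr h)
  have := Finset.card_le_card hsub
  simp only [List.length_cons]
  omega

lemma dfs_hMeasure_visit (grid : List (List String)) (visited : List (Int × Int))
    (v : Int × Int) (rest : List (Int × Int)) (hv : v ∉ visited) :
    dfs_hMeasure grid (PySem.Set.add visited v)
      ((if dfs_hCell grid v.2 (v.1 - 1) = some "-" ∧ 0 ≤ v.1 - 1 then [(v.1 - 1, v.2)] else []) ++
       ((if dfs_hCell grid v.2 (v.1 + 1) = some "-" ∧ v.1 + 1 < 10 then [(v.1 + 1, v.2)] else []) ++ rest))
    < dfs_hMeasure grid visited (v :: rest) := by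
  unfold dfs_hMeasure
  set S' : List (Int × Int) :=
      (if dfs_hCell grid v.2 (v.1 - 1) = some "-" ∧ 0 ≤ v.1 - 1 then [(v.1 - 1, v.2)] else []) ++
       ((if dfs_hCell grid v.2 (v.1 + 1) = some "-" ∧ v.1 + 1 < 10 then [(v.1 + 1, v.2)] else []) ++ rest) with hS'
  have hrow : ∀ r : Int, dfs_hCell grid v.2 r ≠ none → r ∈ dfs_hRows grid := by
    intro r hr
    have hg : PySem.List.pyGet? grid r ≠ none := by
      intro h; unfold dfs_hCell at hr; rw [h] at hr; exact hr rfl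
    rw [Ne, PySem.List.pyGet?_eq_none_iff, not_not] at hg
    unfold PySem.Raise.InRange at hg
    simp only [dfs_hRows, Finset.mem_image, Finset.mem_range]
    exact ⟨(r + grid.length).toNat, by omega, by omega⟩
  have hmemS' : ∀ x ∈ S', x ∈ ((dfs_hRows grid) ×ˢ (((v :: rest).toFinset).image Prod.snd)) ∪ (v :: rest).toFinset := by
    intro x hx
    simp only [hS', List.mem_append] at hx
    have hcol : v.2 ∈ ((v :: rest).toFinset).image Prod.snd := by
      simp only [Finset.mem_image, List.mem_toFinset, List.mem_cons]
      exact ⟨v, Or.inl rfl, rfl⟩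
    rcases hx with hx | hx | hx
    · split at hx
      · rename_i hc
        simp only [List.mem_singleton] at hx
        subst hx
        exact Finset.mem_union_left _ (Finset.mem_product.mpr ⟨hrow _ (by rw [hc.1]; simp), hcol⟩)
      · simp at hx
    · split at hx
      · rename_i hc
        simp only [List.mem_singleton] at hx
        subst hx
        exact Finset.mem_union_left _ (Finset.mem_product.mpr ⟨hrow _ (by rw [hc.1]; simp), hcol⟩)
      · simp at hx
    · exact Finset.mem_union_right _ (by simp [List.mem_toFinset.mpr hx])
  have hvis' : (PySem.Set.add visited v).toFinset = insert v visited.toFinset := by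
    rw [PySem.Set.add_of_not_mem hv]
    simp [List.toFinset_append]
  have hsub : (((dfs_hRows grid) ×ˢ (S'.toFinset.image Prod.snd)) ∪ S'.toFinset) \ (PySem.Set.add visited v).toFinset
      ⊆ (((((dfs_hRows grid) ×ˢ (((v :: rest).toFinset).image Prod.snd)) ∪ (v :: rest).toFinset) \ visited.toFinset)).erase v := by
    intro x hx
    rw [Finset.mem_sdiff, hvis'] at hx
    obtain ⟨hx1, hx2⟩ := hx
    rw [Finset.mem_insert, not_or] at hx2
    have hcols : ∀ y ∈ S', y.2 ∈ (((v :: rest).toFinset).image Prod.snd) := by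
      intro y hy
      rcases Finset.mem_union.mp (hmemS' y hy) with h | h
      · exact (Finset.mem_product.mp h).2
      · exact Finset.mem_image.mpr ⟨y, h, rfl⟩
    rw [Finset.mem_erase, Finset.mem_sdiff]
    refine ⟨hx2.1, ?_, hx2.2⟩
    rcases Finset.mem_union.mp hx1 with hx1 | hx1
    · rw [Finset.mem_product] at hx1
      obtain ⟨hr, hc⟩ := hx1
      rcases Finset.mem_image.mp hc with ⟨y, hy, hyx⟩
      exact Finset.mem_union_left _ (Finset.mem_product.mpr ⟨hr, hyx ▸ hcols y (List.mem_toFinset.mp hy)⟩)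
    · exact hmemS' x (List.mem_toFinset.mp hx1)
  have hvS : v ∈ ((((dfs_hRows grid) ×ˢ (((v :: rest).toFinset).image Prod.snd)) ∪ (v :: rest).toFinset) \ visited.toFinset) := by
    rw [Finset.mem_sdiff]
    exact ⟨Finset.mem_union_right _ (by simp), by simpa using hv⟩
  have hcard := Finset.card_le_card hsub
  rw [Finset.card_erase_of_mem hvS] at hcard
  have hpos : 0 < ((((dfs_hRows grid) ×ˢ (((v :: rest).toFinset).image Prod.snd)) ∪ (v :: rest).toFinset) \ visited.toFinset).card :=
    Finset.card_pos.mpr ⟨v, hvS⟩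
  have hlen : S'.length ≤ rest.length + 2 := by
    simp only [hS', List.length_append]
    split <;> split <;> simp <;> omega
  simp only [List.length_cons]
  omega

-- literal port of A's while loop (stack head = Python stack top; the Prop-free measure makes it total)
def dfs_hLoop (grid : List (List String)) (visited : List (Int × Int)) (stack : List (Int × Int)) :
    List (Int × Int) :=
  match stack with
  | [] => visited
  | vertex :: rest =>
    if vertex ∈ visited then
      dfs_hLoop grid visited rest
    else
      -- visited.add(vertex); try-push (v0+1,v1) if grid[v0+1][v1]=='-' and v0+1<10 (IndexError → cell
      -- none → no push); then try-push (v0-1,v1) if grid[v0-1][v1]=='-' and v0-1>=0; last push = new top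
      dfs_hLoop grid (PySem.Set.add visited vertex)
        ((if dfs_hCell grid vertex.2 (vertex.1 - 1) = some "-" ∧ 0 ≤ vertex.1 - 1
          then [(vertex.1 - 1, vertex.2)] else []) ++
         ((if dfs_hCell grid vertex.2 (vertex.1 + 1) = some "-" ∧ vertex.1 + 1 < 10
           then [(vertex.1 + 1, vertex.2)] else []) ++ rest))
termination_by dfs_hMeasure grid visited stack
decreasing_by
  · exact dfs_hMeasure_skip grid visited vertex rest
  · exact dfs_hMeasure_visit grid visited vertex rest (by assumption)

def dfs_h (grid : List (List String)) (start : Int × Int) : List (Int × Int) :=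
  dfs_hLoop grid [] [start]

-- ===== PORT B =====

-- Source B's ok(r): try grid[r][c]=='-' except → False
def dfs_h_altOk (grid : List (List String)) (c r : Int) : Bool :=
  match PySem.List.pyGet? grid r with
  | none => false
  | some row => PySem.List.pyGet? row c == some "-"

-- Source B's first while loop: climb upward (r, r-1, …) while r >= 0 and ok(r)
def dfs_h_altUp (grid : List (List String)) (c r : Int) : List (Int × Int) :=
  if 0 ≤ r ∧ dfs_h_altOk grid c r then (r, c) :: dfs_h_altUp grid c (r - 1) else []
termination_by (r + 1).toNat
decreasing_by omega

-- Source B's second while loop: slide downward (r, r+1, …) while r < 10 and ok(r)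
def dfs_h_altDown (grid : List (List String)) (c r : Int) : List (Int × Int) :=
  if r < 10 ∧ dfs_h_altOk grid c r then (r, c) :: dfs_h_altDown grid c (r + 1) else []
termination_by (10 - r).toNat
decreasing_by omega

def dfs_h_alt (grid : List (List String)) (start : Int × Int) : List (Int × Int) :=
  PySem.Set.ofList
    (start :: (dfs_h_altUp grid start.2 (start.1 - 1) ++ dfs_h_altDown grid start.2 (start.1 + 1)))

-- ===== PRECONDITION & SPEC =====
def Spec_dfs_h (grid : List (List String)) (start : Int × Int) (out : List (Int × Int)) : Prop := out = dfs_h_alt grid start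
instance (grid : List (List String)) (start : Int × Int) (out : List (Int × Int)) : Decidable (Spec_dfs_h grid start out) := by unfold Spec_dfs_h; infer_instance

-- ===== CLAIM (what is proved, stated in full; the proofs are below) =====
def Claim_equal_dfs_h : Prop := ∀ (grid : List (List String)) (start : Int × Int), Dom_dfs_h grid start → Spec_dfs_h grid start (dfs_h grid start)

-- ===== LEMMAS AND PROOFS =====

lemma dfs_h_ok_iff (grid : List (List String)) (c r : Int) :
    dfs_h_altOk grid c r = true ↔ dfs_hCell grid c r = some "-" := by
  unfold dfs_h_altOk dfs_hCell
  cases PySem.List.pyGet? grid r <;> simp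

lemma dfs_h_mem_up (grid : List (List String)) (c : Int) :
    ∀ (r : Int) (x : Int × Int), x ∈ dfs_h_altUp grid c r → x.2 = c ∧ 0 ≤ x.1 ∧ x.1 ≤ r := by
  have key : ∀ (n : Nat) (r : Int), (r + 1).toNat ≤ n →
      ∀ x ∈ dfs_h_altUp grid c r, x.2 = c ∧ 0 ≤ x.1 ∧ x.1 ≤ r := by
    intro n
    induction n with
    | zero =>
      intro r hr x hx
      rw [dfs_h_altUp, if_neg (by omega : ¬(0 ≤ r ∧ dfs_h_altOk grid c r = true))] at hx
      simp at hx
    | succ n ih =>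
      intro r hr x hx
      rw [dfs_h_altUp] at hx
      by_cases h : 0 ≤ r ∧ dfs_h_altOk grid c r = true
      · rw [if_pos h] at hx
        rcases List.mem_cons.mp hx with rfl | hx
        · exact ⟨rfl, h.1, le_refl _⟩
        · have := ih (r - 1) (by omega) x hx
          exact ⟨this.1, this.2.1, by omega⟩
      · rw [if_neg h] at hx; simp at hx
  exact fun r => key (r + 1).toNat r le_rfl

lemma dfs_h_mem_down (grid : List (List String)) (c : Int) :
    ∀ (r : Int) (x : Int × Int), x ∈ dfs_h_altDown grid c r → x.2 = c ∧ r ≤ x.1 := by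
  have key : ∀ (n : Nat) (r : Int), (10 - r).toNat ≤ n →
      ∀ x ∈ dfs_h_altDown grid c r, x.2 = c ∧ r ≤ x.1 := by
    intro n
    induction n with
    | zero =>
      intro r hr x hx
      rw [dfs_h_altDown, if_neg (by omega : ¬(r < 10 ∧ dfs_h_altOk grid c r = true))] at hx
      simp at hx
    | succ n ih =>
      intro r hr x hx
      rw [dfs_h_altDown] at hx
      by_cases h : r < 10 ∧ dfs_h_altOk grid c r = true
      · rw [if_pos h] at hx
        rcases List.mem_cons.mp hx with rfl | hx
        · exact ⟨rfl, le_refl _⟩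
        · have := ih (r + 1) (by omega) x hx
          exact ⟨this.1, by omega⟩
      · rw [if_neg h] at hx; simp at hx
  exact fun r => key (10 - r).toNat r le_rfl

lemma dfs_h_nodup_up (grid : List (List String)) (c : Int) :
    ∀ (r : Int), (dfs_h_altUp grid c r).Nodup := by
  have key : ∀ (n : Nat) (r : Int), (r + 1).toNat ≤ n → (dfs_h_altUp grid c r).Nodup := by
    intro n
    induction n with
    | zero =>
      intro r hr
      rw [dfs_h_altUp, if_neg (by omega : ¬(0 ≤ r ∧ dfs_h_altOk grid c r = true))]
      exact List.nodup_nil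
    | succ n ih =>
      intro r hr
      rw [dfs_h_altUp]
      by_cases h : 0 ≤ r ∧ dfs_h_altOk grid c r = true
      · rw [if_pos h]
        refine List.nodup_cons.mpr ⟨fun hmem => ?_, ih (r - 1) (by omega)⟩
        have := dfs_h_mem_up grid c (r - 1) _ hmem
        omega
      · rw [if_neg h]; exact List.nodup_nil
  exact fun r => key (r + 1).toNat r le_rfl

lemma dfs_h_nodup_down (grid : List (List String)) (c : Int) :
    ∀ (r : Int), (dfs_h_altDown grid c r).Nodup := by
  have key : ∀ (n : Nat) (r : Int), (10 - r).toNat ≤ n → (dfs_h_altDown grid c r).Nodup := by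
    intro n
    induction n with
    | zero =>
      intro r hr
      rw [dfs_h_altDown, if_neg (by omega : ¬(r < 10 ∧ dfs_h_altOk grid c r = true))]
      exact List.nodup_nil
    | succ n ih =>
      intro r hr
      rw [dfs_h_altDown]
      by_cases h : r < 10 ∧ dfs_h_altOk grid c r = true
      · rw [if_pos h]
        refine List.nodup_cons.mpr ⟨fun hmem => ?_, ih (r + 1) (by omega)⟩
        have := dfs_h_mem_down grid c (r + 1) _ hmem
        omega
      · rw [if_neg h]; exact List.nodup_nil
  exact fun r => key (10 - r).toNat r le_rfl

lemma dfs_hLoop_skip (grid : List (List String)) (visited : List (Int × Int))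
    (v : Int × Int) (rest : List (Int × Int)) (hv : v ∈ visited) :
    dfs_hLoop grid visited (v :: rest) = dfs_hLoop grid visited rest := by
  rw [dfs_hLoop]
  simp [hv]

lemma dfs_hLoop_up (grid : List (List String)) (c : Int) :
    ∀ (n : Nat) (r : Int), (r + 1).toNat ≤ n → 0 ≤ r → dfs_h_altOk grid c r = true →
    ∀ (visited st : List (Int × Int)), (r + 1, c) ∈ visited → (∀ r' ≤ r, (r', c) ∉ visited) →
    dfs_hLoop grid visited ((r, c) :: st) = dfs_hLoop grid (visited ++ dfs_h_altUp grid c r) st := by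
  intro n
  induction n with
  | zero => intro r hr h0 _ _ _ _ _; omega
  | succ n ih =>
    intro r hr h0 hok visited st hvis hnvis
    have hnm : (r, c) ∉ visited := hnvis r le_rfl
    rw [dfs_hLoop, if_neg hnm, PySem.Set.add_of_not_mem hnm]
    dsimp only
    have hup : dfs_h_altUp grid c r = (r, c) :: dfs_h_altUp grid c (r - 1) := by
      rw [dfs_h_altUp, if_pos ⟨h0, hok⟩]
    by_cases hU : dfs_hCell grid c (r - 1) = some "-" ∧ 0 ≤ r - 1
    · have hokU : dfs_h_altOk grid c (r - 1) = true := (dfs_h_ok_iff grid c (r - 1)).mpr hU.1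
      have hmem : (r - 1 + 1, c) ∈ visited ++ [(r, c)] := by
        simp [show r - 1 + 1 = r by omega]
      have hnvis' : ∀ r' ≤ r - 1, (r', c) ∉ visited ++ [(r, c)] := by
        intro r' hr' hmem'
        rcases List.mem_append.mp hmem' with h | h
        · exact hnvis r' (by omega) h
        · simp at h; omega
      have hrec := ih (r - 1) (by omega) hU.2 hokU (visited ++ [(r, c)])
        ((if dfs_hCell grid c (r + 1) = some "-" ∧ r + 1 < 10 then [(r + 1, c)] else []) ++ st)
        hmem hnvis'
      rw [if_pos hU, List.singleton_append, hrec]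
      by_cases hD : dfs_hCell grid c (r + 1) = some "-" ∧ r + 1 < 10
      · rw [if_pos hD, List.singleton_append,
          dfs_hLoop_skip grid _ _ _ (List.mem_append_left _ (List.mem_append_left _ hvis)),
          List.append_assoc, List.singleton_append, hup]
      · rw [if_neg hD, List.nil_append, List.append_assoc, List.singleton_append, hup]
    · have hup0 : dfs_h_altUp grid c (r - 1) = [] := by
        rw [dfs_h_altUp, if_neg]
        rintro ⟨h1, h2⟩
        exact hU ⟨(dfs_h_ok_iff grid c (r - 1)).mp h2, h1⟩
      rw [if_neg hU, List.nil_append]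
      by_cases hD : dfs_hCell grid c (r + 1) = some "-" ∧ r + 1 < 10
      · rw [if_pos hD, List.singleton_append,
          dfs_hLoop_skip grid _ _ _ (List.mem_append_left _ hvis), hup, hup0]
      · rw [if_neg hD, List.nil_append, hup, hup0]

lemma dfs_hLoop_down (grid : List (List String)) (c : Int) :
    ∀ (n : Nat) (r : Int), (10 - r).toNat ≤ n → r < 10 → dfs_h_altOk grid c r = true →
    ∀ (visited st : List (Int × Int)), (r - 1, c) ∈ visited → (∀ r', r ≤ r' → (r', c) ∉ visited) →
    dfs_hLoop grid visited ((r, c) :: st) = dfs_hLoop grid (visited ++ dfs_h_altDown grid c r) st := by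
  intro n
  induction n with
  | zero => intro r hr h10 _ _ _ _ _; omega
  | succ n ih =>
    intro r hr h10 hok visited st hvis hnvis
    have hnm : (r, c) ∉ visited := hnvis r le_rfl
    rw [dfs_hLoop, if_neg hnm, PySem.Set.add_of_not_mem hnm]
    dsimp only
    have hdown : dfs_h_altDown grid c r = (r, c) :: dfs_h_altDown grid c (r + 1) := by
      rw [dfs_h_altDown, if_pos ⟨h10, hok⟩]
    have hskip : ∀ st' : List (Int × Int),
        dfs_hLoop grid (visited ++ [(r, c)])
          ((if dfs_hCell grid c (r - 1) = some "-" ∧ 0 ≤ r - 1 then [(r - 1, c)] else []) ++ st')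
        = dfs_hLoop grid (visited ++ [(r, c)]) st' := by
      intro st'
      by_cases hU : dfs_hCell grid c (r - 1) = some "-" ∧ 0 ≤ r - 1
      · rw [if_pos hU, List.singleton_append,
          dfs_hLoop_skip grid _ _ _ (List.mem_append_left _ hvis)]
      · rw [if_neg hU, List.nil_append]
    rw [hskip]
    by_cases hD : dfs_hCell grid c (r + 1) = some "-" ∧ r + 1 < 10
    · have hokD : dfs_h_altOk grid c (r + 1) = true := (dfs_h_ok_iff grid c (r + 1)).mpr hD.1
      have hmem : (r + 1 - 1, c) ∈ visited ++ [(r, c)] := by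
        simp [show r + 1 - 1 = r by omega]
      have hnvis' : ∀ r', r + 1 ≤ r' → (r', c) ∉ visited ++ [(r, c)] := by
        intro r' hr' hmem'
        rcases List.mem_append.mp hmem' with h | h
        · exact hnvis r' (by omega) h
        · simp at h; omega
      have hrec := ih (r + 1) (by omega) hD.2 hokD (visited ++ [(r, c)]) st hmem hnvis'
      rw [if_pos hD, List.singleton_append, hrec,
        List.append_assoc, List.singleton_append, hdown]
    · have hdown0 : dfs_h_altDown grid c (r + 1) = [] := by
        rw [dfs_h_altDown, if_neg]
        rintro ⟨h1, h2⟩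
        exact hD ⟨(dfs_h_ok_iff grid c (r + 1)).mp h2, h1⟩
      rw [if_neg hD, List.nil_append, hdown, hdown0]

-- ===== VERDICT (by name: the statement is the Claim_ definition above) =====
theorem dfs_h_spec : Claim_equal_dfs_h := by
  intro grid start _
  unfold Spec_dfs_h
  obtain ⟨r0, c⟩ := start
  have hBup := dfs_h_mem_up grid c (r0 - 1)
  have hBdown := dfs_h_mem_down grid c (r0 + 1)
  have hnodup : ((r0, c) :: (dfs_h_altUp grid c (r0 - 1) ++ dfs_h_altDown grid c (r0 + 1))).Nodup := by
    refine List.nodup_cons.mpr ⟨fun hmem => ?_, ?_⟩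
    · rcases List.mem_append.mp hmem with h | h
      · have := hBup _ h; simp at this
      · have := hBdown _ h; simp at this
    · refine List.Nodup.append (dfs_h_nodup_up grid c _) (dfs_h_nodup_down grid c _) ?_
      intro x hx hx'
      have h1 := hBup x hx
      have h2 := hBdown x hx'
      omega
  have hB : dfs_h_alt grid (r0, c)
      = (r0, c) :: (dfs_h_altUp grid c (r0 - 1) ++ dfs_h_altDown grid c (r0 + 1)) := by
    unfold dfs_h_alt
    dsimp only
    exact PySem.Set.ofList_eq_self_of_nodup _ hnodup
  rw [hB]
  unfold dfs_h
  rw [dfs_hLoop, if_neg List.not_mem_nil, PySem.Set.add_of_not_mem List.not_mem_nil,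
    List.nil_append]
  dsimp only
  by_cases hU : dfs_hCell grid c (r0 - 1) = some "-" ∧ 0 ≤ r0 - 1
  · have hokU : dfs_h_altOk grid c (r0 - 1) = true := (dfs_h_ok_iff grid c (r0 - 1)).mpr hU.1
    have hmemU : (r0 - 1 + 1, c) ∈ [(r0, c)] := by simp [show r0 - 1 + 1 = r0 by omega]
    have hnvisU : ∀ r' ≤ r0 - 1, (r', c) ∉ [(r0, c)] := by
      intro r' hr' hmem; simp at hmem; omega
    by_cases hD : dfs_hCell grid c (r0 + 1) = some "-" ∧ r0 + 1 < 10
    · rw [if_pos hU, if_pos hD]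
      simp only [List.append_nil, List.singleton_append]
      rw [dfs_hLoop_up grid c (r0 - 1 + 1).toNat (r0 - 1) le_rfl hU.2 hokU [(r0, c)] [(r0 + 1, c)]
          hmemU hnvisU]
      have hokD : dfs_h_altOk grid c (r0 + 1) = true := (dfs_h_ok_iff grid c (r0 + 1)).mpr hD.1
      have hmemD : (r0 + 1 - 1, c) ∈ [(r0, c)] ++ dfs_h_altUp grid c (r0 - 1) := by
        simp [show r0 + 1 - 1 = r0 by omega]
      have hnvisD : ∀ r', r0 + 1 ≤ r' → (r', c) ∉ [(r0, c)] ++ dfs_h_altUp grid c (r0 - 1) := by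
        intro r' hr' hmem
        rcases List.mem_append.mp hmem with h | h
        · simp at h; omega
        · have := hBup _ h; simp at this; omega
      rw [dfs_hLoop_down grid c (10 - (r0 + 1)).toNat (r0 + 1) le_rfl hD.2 hokD _ [] hmemD hnvisD,
        dfs_hLoop, List.append_assoc, List.singleton_append]
    · have hdown0 : dfs_h_altDown grid c (r0 + 1) = [] := by
        rw [dfs_h_altDown, if_neg]
        rintro ⟨h1, h2⟩
        exact hD ⟨(dfs_h_ok_iff grid c (r0 + 1)).mp h2, h1⟩
      rw [if_pos hU, if_neg hD]
      simp only [List.append_nil, List.nil_append]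
      rw [dfs_hLoop_up grid c (r0 - 1 + 1).toNat (r0 - 1) le_rfl hU.2 hokU [(r0, c)] [] hmemU hnvisU,
        dfs_hLoop, hdown0, List.append_nil, List.singleton_append]
  · have hup0 : dfs_h_altUp grid c (r0 - 1) = [] := by
      rw [dfs_h_altUp, if_neg]
      rintro ⟨h1, h2⟩
      exact hU ⟨(dfs_h_ok_iff grid c (r0 - 1)).mp h2, h1⟩
    by_cases hD : dfs_hCell grid c (r0 + 1) = some "-" ∧ r0 + 1 < 10
    · have hokD : dfs_h_altOk grid c (r0 + 1) = true := (dfs_h_ok_iff grid c (r0 + 1)).mpr hD.1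
      have hmemD : (r0 + 1 - 1, c) ∈ [(r0, c)] := by simp [show r0 + 1 - 1 = r0 by omega]
      have hnvisD : ∀ r', r0 + 1 ≤ r' → (r', c) ∉ [(r0, c)] := by
        intro r' hr' hmem; simp at hmem; omega
      rw [if_neg hU, if_pos hD]
      simp only [List.append_nil, List.nil_append]
      rw [dfs_hLoop_down grid c (10 - (r0 + 1)).toNat (r0 + 1) le_rfl hD.2 hokD [(r0, c)] [] hmemD
          hnvisD,
        dfs_hLoop, hup0, List.nil_append, List.singleton_append]
    · have hdown0 : dfs_h_altDown grid c (r0 + 1) = [] := by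
        rw [dfs_h_altDown, if_neg]
        rintro ⟨h1, h2⟩
        exact hD ⟨(dfs_h_ok_iff grid c (r0 + 1)).mp h2, h1⟩
      rw [if_neg hU, if_neg hD]
      simp only [List.nil_append]
      rw [dfs_hLoop, hup0, hdown0]
      rfl
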